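-- pv_equiv track=rewrite | github.com/grpc/grpc | tools/run_tests/jobset.py | tag_remaining
-- ===== SOURCE A (Python) =====
-- def tag_remaining(xs):
--   staging = []
--   for x in xs:
--     staging.append(x)
--     if len(staging) > 5000:
--       yield (staging.pop(0), None)
--   n = len(staging)
--   for i, x in enumerate(staging):
--     yield (x, n - i - 1)
-- ===== SOURCE B (Python) =====
-- def tag_remaining(xs):
--   items = list(xs)
--   total = len(items)
--   for j, x in enumerate(items):
--     if j < total - 5000:
--       yield (x, None)
--     else:
--       yield (x, total - 1 - j)
-- ===== Notes on version B (the rewrite author's own statement) =====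
-- stated objective: simpler
-- what changed: B materializes the input once, takes its total length, and tags each item in a single enumerate pass with the closed-form remaining count total-1-j (None while j < total-5000), eliminating A's 5000-element sliding buffer with pop(0) and the second staging pass.
import Mathlib
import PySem

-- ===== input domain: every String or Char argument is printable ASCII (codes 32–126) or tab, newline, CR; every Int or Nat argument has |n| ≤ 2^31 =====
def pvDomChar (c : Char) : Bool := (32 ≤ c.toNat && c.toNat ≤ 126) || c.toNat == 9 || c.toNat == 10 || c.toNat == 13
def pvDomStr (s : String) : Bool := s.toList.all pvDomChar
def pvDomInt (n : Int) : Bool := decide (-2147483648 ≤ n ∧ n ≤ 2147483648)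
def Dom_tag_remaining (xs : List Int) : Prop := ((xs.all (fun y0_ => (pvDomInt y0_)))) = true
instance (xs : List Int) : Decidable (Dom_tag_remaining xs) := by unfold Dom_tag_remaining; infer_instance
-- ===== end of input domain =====

-- B replaces A's 5000-element sliding buffer and second staging pass by one enumerate
-- pass with the closed-form remaining count (objective: simpler).


-- ===== PORT A =====
-- the final 'for i, x in enumerate(staging): yield (x, n - i - 1)' pass
def tagA_finish (staging : List Int) : List (Int × Option Int) :=
  (PySem.List.enumerate staging).map (fun p => (p.2, some ((staging.length : Int) - p.1 - 1)))

-- the main loop: each yield is a cons (streaming generator); staging is the buffer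
def tagA_go : List Int → List Int → List (Int × Option Int)
  | staging, [] => tagA_finish staging
  | staging, x :: rest =>
    if (staging ++ [x]).length > 5000 then
      match staging ++ [x] with
      | [] => []          -- unreachable: staging ++ [x] is nonempty
      | h :: t => (h, none) :: tagA_go t rest
    else tagA_go (staging ++ [x]) rest

def tag_remaining (xs : List Int) : List (Int × Option Int) := tagA_go [] xs

-- ===== PORT B =====
def tag_remaining_alt (xs : List Int) : List (Int × Option Int) :=
  let total : Int := xs.length
  (PySem.List.enumerate xs).map (fun p =>
    if p.1 < total - 5000 then (p.2, none) else (p.2, some (total - 1 - p.1)))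

-- ===== PRECONDITION & SPEC =====
def Spec_tag_remaining (xs : List Int) (out : List (Int × Option Int)) : Prop := out = tag_remaining_alt xs
instance (xs : List Int) (out : List (Int × Option Int)) : Decidable (Spec_tag_remaining xs out) := by unfold Spec_tag_remaining; infer_instance

-- ===== CLAIM (what is proved, stated in full; the proofs are below) =====
def Claim_equal_tag_remaining : Prop := ∀ (xs : List Int), Dom_tag_remaining xs → Spec_tag_remaining xs (tag_remaining xs)

-- ===== LEMMAS AND PROOFS =====

-- tag each element with the number of elements after it
def tagCount : List Int → List (Int × Option Int)
  | [] => []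
  | x :: t => (x, some (t.length : Int)) :: tagCount t

-- reference shape of the common output
def specT : List Int → List (Int × Option Int)
  | [] => []
  | x :: t =>
    if t.length + 1 > 5000 then (x, none) :: specT t
    else (x, some (t.length : Int)) :: specT t

theorem finish_enum (l : List Int) : ∀ (s n : Int), n = s + l.length →
    (PySem.List.enumerate l s).map (fun p => (p.2, some (n - p.1 - 1))) = tagCount l := by
  induction l with
  | nil => intro s n h; simp [PySem.List.enumerate_nil, tagCount]
  | cons x t ih =>
    intro s n h
    rw [PySem.List.enumerate_cons, List.map_cons, tagCount]
    congr 1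
    · have : n - s - 1 = (t.length : Int) := by
        simp only [List.length_cons] at h; push_cast at h; omega
      rw [this]
    · exact ih (s + 1) n (by simp only [List.length_cons] at h; push_cast at h ⊢; omega)

theorem tagA_finish_eq (l : List Int) : tagA_finish l = tagCount l := by
  exact finish_enum l 0 l.length (by omega)

theorem specT_low (l : List Int) (h : l.length ≤ 5000) : specT l = tagCount l := by
  induction l with
  | nil => rfl
  | cons x t ih =>
    simp only [List.length_cons] at h
    rw [specT, tagCount, if_neg (by omega), ih (by omega)]

theorem tagA_go_eq (xs : List Int) : ∀ staging : List Int, staging.length ≤ 5000 →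
    tagA_go staging xs = specT (staging ++ xs) := by
  induction xs with
  | nil =>
    intro staging h
    rw [List.append_nil, tagA_go, tagA_finish_eq, specT_low staging h]
  | cons x rest ih =>
    intro staging h
    rw [tagA_go]
    by_cases hlen : (staging ++ [x]).length > 5000
    · rw [if_pos hlen]
      have hst : staging ≠ [] := by
        intro he; subst he; simp at hlen
      obtain ⟨a, s', rfl⟩ := List.exists_cons_of_ne_nil hst
      simp only [List.cons_append]
      rw [ih (s' ++ [x]) (by simp at hlen h ⊢; omega)]
      rw [specT, if_pos (by simp at hlen ⊢; omega)]
      congr 1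
      simp
    · rw [if_neg hlen]
      rw [ih (staging ++ [x]) (by omega)]
      rw [List.append_assoc]
      rfl

theorem alt_enum (l : List Int) : ∀ (s n : Int), n = s + l.length →
    (PySem.List.enumerate l s).map (fun p =>
      if p.1 < n - 5000 then (p.2, none) else (p.2, some (n - 1 - p.1)))
    = specT l := by
  induction l with
  | nil => intro s n h; simp [PySem.List.enumerate_nil, specT]
  | cons x t ih =>
    intro s n h
    simp only [List.length_cons] at h; push_cast at h
    rw [PySem.List.enumerate_cons, List.map_cons, specT]
    by_cases hb : (t.length + 1 : Nat) > 5000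
    · rw [if_pos hb]
      congr 1
      · rw [if_pos (by omega)]
      · exact ih (s + 1) n (by omega)
    · rw [if_neg hb]
      congr 1
      · rw [if_neg (by omega)]
        have : n - 1 - s = (t.length : Int) := by omega
        rw [this]
      · exact ih (s + 1) n (by omega)

theorem alt_eq (xs : List Int) : tag_remaining_alt xs = specT xs := by
  have := alt_enum xs 0 xs.length (by omega)
  simpa [tag_remaining_alt] using this

-- ===== VERDICT (by name: the statement is the Claim_ definition above) =====
theorem tag_remaining_spec : Claim_equal_tag_remaining := by
  intro xs _
  unfold Spec_tag_remaining tag_remaining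
  rw [tagA_go_eq xs [] (by simp), List.nil_append, alt_eq]
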